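-- pv_equiv track=rewrite | github.com/ejamshaidbese24seecs-glitch/Nexa | metadata.py | is_strictly_english
-- ===== SOURCE A (Python) =====
-- ENGLISH_STOP = {"the", "and", "is", "of", "in", "to", "with", "that", "for", "are", "this"}
--
-- GERMAN_STOP = {"der", "die", "und", "ist", "den", "von", "zu", "das", "sich", "des", "eine", "mit"}
--
-- FRENCH_STOP = {"le", "la", "et", "des", "en", "un", "une", "que", "dans", "pour", "sur", "qui"}
--
-- def is_strictly_english(text):
--     words = text.lower().split()[:500]
--     eng_score = 0
--     foreign_score = 0
--
--     for w in words:
--         if w in ENGLISH_STOP: eng_score += 1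
--         elif w in GERMAN_STOP or w in FRENCH_STOP: foreign_score += 1
--
--     if eng_score < 3: return False
--     if foreign_score > (eng_score * 0.1): return False
--     return True
-- ===== SOURCE B (Python) =====
-- ENGLISH_STOP = {"the", "and", "is", "of", "in", "to", "with", "that", "for", "are", "this"}
--
-- GERMAN_STOP = {"der", "die", "und", "ist", "den", "von", "zu", "das", "sich", "des", "eine", "mit"}
--
-- FRENCH_STOP = {"le", "la", "et", "des", "en", "un", "une", "que", "dans", "pour", "sur", "qui"}
--
-- def is_strictly_english(text):
--     # Build a frequency table once, then score by iterating over the fixed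
--     # stopword vocabularies instead of over every word.
--     freq = {}
--     for w in text.lower().split()[:500]:
--         freq[w] = freq.get(w, 0) + 1
--     eng_score = sum(freq.get(w, 0) for w in ENGLISH_STOP)
--     foreign_score = sum(freq.get(w, 0) for w in GERMAN_STOP | FRENCH_STOP)
--     # 10*foreign > eng is exact for eng <= 500 (words are capped at 500)
--     return eng_score >= 3 and not (10 * foreign_score > eng_score)
-- ===== Notes on version B (the rewrite author's own statement) =====
-- stated objective: alternative
-- what changed: B builds a word-frequency table in one pass and then scores by summing the counts of each fixed stopword vocabulary (iterating over the stopword sets), instead of classifying every word against three sets inside the main loop; the float threshold eng*0.1 is replaced by the exact integer test 10*foreign > eng (exact since at most 500 words are scored).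
import Mathlib
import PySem

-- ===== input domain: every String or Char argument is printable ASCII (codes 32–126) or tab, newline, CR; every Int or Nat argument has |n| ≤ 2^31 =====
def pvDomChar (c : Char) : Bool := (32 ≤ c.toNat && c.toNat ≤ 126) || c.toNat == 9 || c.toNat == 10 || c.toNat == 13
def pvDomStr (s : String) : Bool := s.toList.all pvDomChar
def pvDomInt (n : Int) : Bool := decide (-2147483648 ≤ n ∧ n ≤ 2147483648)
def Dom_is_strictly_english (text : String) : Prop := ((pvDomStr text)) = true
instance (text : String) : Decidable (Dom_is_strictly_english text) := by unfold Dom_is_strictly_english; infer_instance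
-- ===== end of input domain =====

-- B replaces the per-word three-way classification loop by a frequency table summed
-- over the fixed stopword vocabularies (alternative decomposition, same cost).

-- ===== PORT A =====
def engStop : List String := ["the", "and", "is", "of", "in", "to", "with", "that", "for", "are", "this"]
def gerStop : List String := ["der", "die", "und", "ist", "den", "von", "zu", "das", "sich", "des", "eine", "mit"]
def freStop : List String := ["le", "la", "et", "des", "en", "un", "une", "que", "dans", "pour", "sur", "qui"]

-- 'foreign_score > eng_score * 0.1' is ported as the integer test 10*foreign > eng:
-- exact here, since eng_score ≤ 500 (words are capped at 500) and for all
-- 0 ≤ e ≤ 500 the float comparison f > e*0.1 agrees with 10*f > e.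
def is_strictly_english (text : String) : Bool :=
  let words := (PySem.Str.split₀ (PySem.Str.lower text)).take 500
  let scores : Int × Int := words.foldl
    (fun s w =>
      if engStop.contains w then (s.1 + 1, s.2)
      else if gerStop.contains w || freStop.contains w then (s.1, s.2 + 1)
      else s)
    (0, 0)
  if scores.1 < 3 then false
  else if 10 * scores.2 > scores.1 then false
  else true

-- ===== PORT B =====
-- GERMAN_STOP | FRENCH_STOP as a set (distinct elements; "des" occurs in both)
def forStop : List String :=
  ["der", "die", "und", "ist", "den", "von", "zu", "das", "sich", "des", "eine", "mit",
   "le", "la", "et", "en", "un", "une", "que", "dans", "pour", "sur", "qui"]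

def is_strictly_english_alt (text : String) : Bool :=
  let words := (PySem.Str.split₀ (PySem.Str.lower text)).take 500
  let freq : PySem.Dict String Int :=
    words.foldl (fun d w => d.insert w (d.getD w 0 + 1)) PySem.Dict.empty
  let eng := (engStop.map (fun w => freq.getD w 0)).sum
  let forn := (forStop.map (fun w => freq.getD w 0)).sum
  decide (3 ≤ eng) && !(decide (10 * forn > eng))

-- ===== PRECONDITION & SPEC =====
def Spec_is_strictly_english (text : String) (out : Bool) : Prop := out = is_strictly_english_alt text
instance (text : String) (out : Bool) : Decidable (Spec_is_strictly_english text out) := by unfold Spec_is_strictly_english; infer_instance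

-- ===== CLAIM (what is proved, stated in full; the proofs are below) =====
def Claim_equal_is_strictly_english : Prop := ∀ (text : String), Dom_is_strictly_english text → Spec_is_strictly_english text (is_strictly_english text)

-- ===== LEMMAS AND PROOFS =====

-- A's pair fold counts the two predicates
theorem foldl_scores (ws : List String) (a b : Int) :
    ws.foldl
      (fun s w =>
        if engStop.contains w then (s.1 + 1, s.2)
        else if gerStop.contains w || freStop.contains w then (s.1, s.2 + 1)
        else s)
      (a, b)
    = (a + (ws.countP (fun w => engStop.contains w) : Int),
       b + (ws.countP (fun w => !engStop.contains w && (gerStop.contains w || freStop.contains w)) : Int)) := by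
  induction ws generalizing a b with
  | nil => simp
  | cons w ws ih =>
    rw [List.foldl_cons]
    by_cases h1 : engStop.contains w
    · have hf : (!engStop.contains w && (gerStop.contains w || freStop.contains w)) = false := by
        rw [h1]; rfl
      rw [if_pos h1, ih, List.countP_cons, List.countP_cons, if_pos h1, if_neg (by rw [hf]; exact Bool.false_ne_true)]
      simp only [Prod.mk.injEq]
      constructor <;> push_cast <;> ring
    · have hf : (!engStop.contains w && (gerStop.contains w || freStop.contains w))
          = (gerStop.contains w || freStop.contains w) := by
        rw [Bool.not_eq_true] at h1; rw [h1]; rfl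
      rw [if_neg h1]
      by_cases h2 : (gerStop.contains w || freStop.contains w) = true
      · rw [if_pos h2, ih, List.countP_cons, List.countP_cons,
          if_neg h1, if_pos (by rw [hf]; exact h2)]
        simp only [Prod.mk.injEq]
        constructor <;> push_cast <;> ring
      · rw [if_neg h2, ih, List.countP_cons, List.countP_cons,
          if_neg h1, if_neg (by rw [hf]; exact h2)]
        simp

-- sum of per-element counts over a duplicate-free vocabulary = count of membership
theorem sum_if_mem (S : List String) (hS : S.Nodup) (w : String) :
    (S.map (fun s => if s = w then (1 : Int) else 0)).sum
      = if S.contains w then (1 : Int) else 0 := by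
  induction S with
  | nil => simp
  | cons x S ihS =>
    have hx : x ∉ S := (List.nodup_cons.mp hS).1
    have ih := ihS (List.nodup_cons.mp hS).2
    rw [List.map_cons, List.sum_cons, ih]
    by_cases h : x = w
    · subst h
      have hc : S.contains x = false := by simp [hx]
      simp [hx]
    · have hm : (x :: S).contains w = S.contains w := by
        simp
        intro h'; exact absurd h'.symm h
      rw [if_neg h, hm, zero_add]

theorem sum_count_eq_countP (S : List String) (hS : S.Nodup) (ws : List String) :
    (S.map (fun s => (ws.count s : Int))).sum = (ws.countP (fun w => S.contains w) : Int) := by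
  induction ws with
  | nil => simp
  | cons w ws ih =>
    have hsplit : (S.map (fun s => ((w :: ws).count s : Int))).sum
        = (S.map (fun s => (ws.count s : Int))).sum
          + (S.map (fun s => if s = w then (1 : Int) else 0)).sum := by
      rw [← List.sum_map_add]
      apply congrArg List.sum
      apply List.map_congr_left
      intro s _
      by_cases h : s = w
      · simp [h]
      · simp [h, Ne.symm h]
    rw [hsplit, sum_if_mem S hS w, ih, List.countP_cons]
    by_cases h : S.contains w
    · rw [if_pos h, if_pos h]; push_cast; ring
    · rw [if_neg h, if_neg h]; simp

-- foreign predicates agree pointwise: forStop is GERMAN ∪ FRENCH and is disjoint from engStop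
theorem forP_eq (w : String) :
    forStop.contains w = (!engStop.contains w && (gerStop.contains w || freStop.contains w)) := by
  by_cases h : forStop.contains w
  · have hmem : w ∈ forStop := by simpa using h
    fin_cases hmem <;> decide
  · have hg : ¬ (gerStop.contains w || freStop.contains w) = true := by
      intro hc
      apply h
      rcases Bool.or_eq_true _ _ |>.mp hc with hg | hf
      · have : w ∈ gerStop := by simpa using hg
        fin_cases this <;> decide
      · have : w ∈ freStop := by simpa using hf
        fin_cases this <;> decide
    rw [Bool.not_eq_true] at h hg
    rw [h, hg]; simp

-- B's dict lookup is List.count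
theorem freq_getD (ws : List String) (v : String) :
    ((ws.foldl (fun d w => d.insert w (d.getD w 0 + 1)) PySem.Dict.empty).getD v 0) = (ws.count v : Int) := by
  rw [PySem.Dict.getD_foldl_insert_add_one]
  simp

-- ===== VERDICT (by name: the statement is the Claim_ definition above) =====
theorem is_strictly_english_spec : Claim_equal_is_strictly_english := by
  intro text _
  unfold Spec_is_strictly_english is_strictly_english is_strictly_english_alt
  set ws := (PySem.Str.split₀ (PySem.Str.lower text)).take 500 with hws
  simp only [foldl_scores, zero_add]
  have hmap : ∀ (S : List String),
      (S.map (fun w => ((ws.foldl (fun d w => d.insert w (d.getD w 0 + 1)) PySem.Dict.empty).getD w 0))).sum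
        = (S.map (fun s => (ws.count s : Int))).sum := by
    intro S
    apply congrArg List.sum
    apply List.map_congr_left
    intro s _
    exact freq_getD ws s
  have heng := (hmap engStop).trans (sum_count_eq_countP engStop (by decide) ws)
  have hfor := (hmap forStop).trans (sum_count_eq_countP forStop (by decide) ws)
  rw [List.countP_congr (fun w _ => by rw [forP_eq])] at hfor
  rw [heng, hfor]
  set e := (ws.countP (fun w => engStop.contains w) : Int)
  set f := (ws.countP (fun w => !engStop.contains w && (gerStop.contains w || freStop.contains w)) : Int)
  by_cases h1 : e < 3
  · have h1' : ¬ (3 ≤ e) := by omega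
    simp [h1, h1']
  · have h1' : (3 ≤ e) := by omega
    by_cases h2 : 10 * f > e
    · simp [h1, h1', h2]
    · simp [h1, h1', h2]
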